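/- GENERATED by tools/from_farm_form.py from prooffarm-gif/accepted/DGifOpen.4/Proof.lean (a worked proof of the farm's unit `DGifOpen.4`,
   accepted by the verdict) — do not edit. -/
import Gif.Spec.Units.DGifOpen_4
import Gif.Spec.AllSegs
import Gif.Spec.Proved.DGifOpen_4_Lemmas

open X86 X86.User Asan ProgX.Base ProgX.Base.Spec Gif.Spec

/-!
  `DGifOpen.4` (0x1087b9 … 0x1087da and 0x10889c … 0x1088cb, 18 instructions; dgif_lib.c:217-225): A BODY SEGMENT OF A PROTECTED
  FUNCTION WITH THREE CALLS. The return addresses of the calls are made cuts of the unit's own (Lemmas.lean): `ret14` behind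
  `strncmp` (the assertion is `Opened` itself, at that cut), `ret25` behind `free(pv)` (`d4_AtRet25`), `ret26` behind `free(gif)`
  (`d4_AtRet26`). Four walks, chained here:

      0x1087b9 ── Buf[6] = 0, strncmp("GIFVER", Buf, 3) ── ret14 ─┬─ equal ──────────────────────────────── 0x1087da  `Opened`
                                                                  └─ different: *Error = 103 if not NULL,
                                                                     free(pv) ── ret25 ── free(gif) ── ret26 ── ebx = 0 ── 0x108816  `Done`
-/

/-- Segment 4 of `DGifOpen` takes `Opened` at 0x1087b9 to `Opened` at 0x1087da, or to `Done` at 0x108816 (the stamp is not "GIF":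
NULL, with pv and gif freed). -/
theorem Gif.Spec.Proved.DGifOpen_4_ok : Gif.Spec.DGifOpen_4.Statement := by
  unfold Gif.Spec.DGifOpen_4.Statement
  intro Lay hLay μ hμ u₀ hcode h_strncmp h_free h_asan_store4_noabort
  intro H rest frames R Hc gif pv e ret v hat
  -- the callees' contracts for the frame list of the body (the own frame in front) and the heaps they are entered with
  have hcmp := h_strncmp (Hc.liveObjs ++ rest) (DGifOpen.framesIn frames e)
  have hfree1 := h_free Hc rest (DGifOpen.framesIn frames e) 24936
  have hfree2 := h_free (Hc.release pv) rest (DGifOpen.framesIn frames e) 120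
  -- 0x1087b9 … the call of strncmp … 0x1087d2 (ret14)
  refine (Gif.Spec.DGifOpen_4.d4_seg_strncmp Lay hLay μ hμ u₀ hcode H rest frames R Hc gif pv e ret hcmp v hat).trans ?_
  intro v1 hv1
  -- 0x1087d2 … 0x1087da, or … the call of free(pv) … 0x1088b9 (ret25)
  refine (Gif.Spec.DGifOpen_4.d4_seg_branch Lay hLay μ hμ u₀ hcode H rest frames R Hc gif pv e ret hfree1
    h_asan_store4_noabort v1 hv1).trans ?_
  intro v2 hv2
  rcases hv2 with hopen | h25
  · -- the stamp is "GIF": the exit at the cut 0x1087da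
    exact ReachVia.done (Or.inl hopen)
  · -- 0x1088b9 … the call of free(gif) … 0x1088c1 (ret26)
    refine (Gif.Spec.DGifOpen_4.d4_seg_free2 Lay hLay μ hμ u₀ hcode H rest frames R Hc gif pv e ret hfree2 v2 h25).trans ?_
    intro v3 hv3
    -- 0x1088c1 … 0x108816: the exit to the epilogue
    refine (Gif.Spec.DGifOpen_4.d4_seg_null Lay hLay μ hμ u₀ hcode H rest frames R Hc gif pv e ret v3 hv3).trans ?_
    intro v4 hv4
    exact ReachVia.done (Or.inr hv4)
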